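-- pv_equiv track=rewrite | github.com/ashbyp/pscratch | algorithms/r/alternating_balls_simple.py | solution
-- ===== SOURCE A (Python) =====
-- def solution(buckets_str: str) -> int:
--     buckets = list(buckets_str)
--     len_buckets = len(buckets)
--
--     starting_positions = [i for i in range(len(buckets)) if buckets[i] == 'B']
--     if not starting_positions:
--         return 0
--
--     sequence_length = len(starting_positions) * 2 - 1
--
--     if sequence_length > len_buckets:
--         return -1
--
--     starting_positions_set = set(starting_positions)
--     min_moves = float('inf')
--
--     for i in range(0, len_buckets - sequence_length + 1):
--         positions = [pos for pos in range(i, i + sequence_length + 1, 2)]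
--         moves = 0
--         for pos in positions:
--             if pos not in starting_positions_set:
--                 moves += 1
--         min_moves = min(min_moves, moves)
--
--     return min_moves
-- ===== SOURCE B (Python) =====
-- def solution(buckets_str: str) -> int:
--     n = len(buckets_str)
--     k = sum(1 for c in buckets_str if c == 'B')
--     if k == 0:
--         return 0
--     L = 2 * k - 1
--     if L > n:
--         return -1
--     # pre[j] = number of 'B' at positions p < j with p ≡ j (mod 2)
--     pre = [0, 0]
--     for j in range(2, n + 2):
--         pre.append(pre[j - 2] + (1 if buckets_str[j - 2] == 'B' else 0))
--     best = k
--     for i in range(n - L + 1):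
--         best = min(best, k - (pre[i + 2 * k] - pre[i]))
--     return best
-- ===== Notes on version B (the rewrite author's own statement) =====
-- stated objective: faster
-- what changed: Replaced the O(n*k) rescan of each length-(2k-1) window by a single parity-aware prefix-sum array, making each window's cost O(1) and the whole solution one pass.
import Mathlib
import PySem

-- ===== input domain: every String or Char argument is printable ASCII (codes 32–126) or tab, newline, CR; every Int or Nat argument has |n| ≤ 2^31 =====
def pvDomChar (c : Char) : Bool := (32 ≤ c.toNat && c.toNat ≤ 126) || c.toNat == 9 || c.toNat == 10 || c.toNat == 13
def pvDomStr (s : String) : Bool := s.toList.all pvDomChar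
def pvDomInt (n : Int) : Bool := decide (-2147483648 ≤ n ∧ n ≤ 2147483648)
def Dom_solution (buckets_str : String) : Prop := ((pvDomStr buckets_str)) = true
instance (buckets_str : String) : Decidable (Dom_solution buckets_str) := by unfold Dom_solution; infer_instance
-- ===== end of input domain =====

-- B replaces A's per-window rescan by parity prefix sums (O(1) per window); return value proved equal.

-- ===== PORT A =====
def solution (buckets_str : String) : Int :=
  let buckets := buckets_str.toList
  let len_buckets : Int := (buckets.length : Int)
  let starting_positions := (PySem.List.pyRange 0 len_buckets 1).filter
      (fun i => PySem.List.pyGet? buckets i == some 'B')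
  if starting_positions.isEmpty then 0
  else
    let sequence_length : Int := (starting_positions.length : Int) * 2 - 1
    if sequence_length > len_buckets then -1
    else
      let sps := PySem.Set.ofList starting_positions
      let min_moves :=
        (PySem.List.pyRange 0 (len_buckets - sequence_length + 1) 1).foldl
          (fun (acc : Option Int) i =>
            let positions := PySem.List.pyRange i (i + sequence_length + 1) 2
            let moves : Int := positions.foldl
              (fun m pos => if sps.contains pos then m else m + 1) 0
            some (match acc with | none => moves | some v => min v moves))
          (none : Option Int)
      min_moves.getD 0

-- ===== PORT B =====
def solution_alt (buckets_str : String) : Int :=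
  let n : Int := (PySem.Str.len buckets_str : Int)
  -- sum(1 for c in buckets_str if c == 'B')  (a 0/1 generator sum is a countP)
  let k : Int := (buckets_str.toList.countP (fun c => c == 'B') : Int)
  if k = 0 then 0
  else
    let L : Int := 2 * k - 1
    if L > n then -1
    else
      -- pre[j] = number of 'B' at positions p < j with p ≡ j (mod 2)
      let pre : List Int := (PySem.List.pyRange 2 (n + 2) 1).foldl
        (fun pre j => pre ++ [(PySem.List.pyGet? pre (j - 2)).getD 0 +
          (if PySem.List.pyGet? buckets_str.toList (j - 2) == some 'B' then 1 else 0)])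
        [0, 0]
      (PySem.List.pyRange 0 (n - L + 1) 1).foldl
        (fun best i => min best (k - ((PySem.List.pyGet? pre (i + 2 * k)).getD 0 -
          (PySem.List.pyGet? pre i).getD 0)))
        k

-- ===== PRECONDITION & SPEC =====
def Spec_solution (buckets_str : String) (out : Int) : Prop := out = solution_alt buckets_str
instance (buckets_str : String) (out : Int) : Decidable (Spec_solution buckets_str out) := by unfold Spec_solution; infer_instance

-- ===== CLAIM (what is proved, stated in full; the proofs are below) =====
def Claim_equal_solution : Prop := ∀ (buckets_str : String), Dom_solution buckets_str → Spec_solution buckets_str (solution buckets_str)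

-- ===== LEMMAS AND PROOFS =====

def pvIsB (s : List Char) (p : Nat) : Bool := s[p]? == some 'B'

def pvCnt (s : List Char) (j : Nat) : Nat :=
  ((List.range j).filter (fun p => (p % 2 == j % 2) && pvIsB s p)).length

def pvHit (s : List Char) (k i : Nat) : Nat :=
  ((List.range k).filter (fun t => pvIsB s (i + 2 * t))).length

theorem pvIsB_lt {s : List Char} {p : Nat} (h : pvIsB s p = true) : p < s.length := by
  simp [pvIsB] at h
  exact (List.getElem?_eq_some_iff.mp h).1

theorem pvCnt_step (s : List Char) (j : Nat) :
    pvCnt s (j + 2) = pvCnt s j + (if pvIsB s j then 1 else 0) := by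
  unfold pvCnt
  have hmod : (j + 2) % 2 = j % 2 := Nat.add_mod_right j 2
  rw [show j + 2 = (j+1)+1 by rfl, List.range_succ, List.range_succ, List.filter_append,
    List.filter_append, List.filter_singleton, List.filter_singleton]
  simp only [show (j:Nat)+1+1 = j+2 from rfl, hmod]
  have h1 : (j % 2 == j % 2) = true := by simp
  have h2 : ((j + 1) % 2 == j % 2) = false := by simp; omega
  rw [h1, h2]
  simp
  by_cases hb : pvIsB s j <;> simp [hb]

theorem pvCnt_add (s : List Char) (k i : Nat) :
    pvCnt s (i + 2 * k) = pvCnt s i + pvHit s k i := by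
  induction k with
  | zero => simp [pvHit]
  | succ k ih =>
    have : i + 2 * (k+1) = (i + 2*k) + 2 := by omega
    rw [this, pvCnt_step, ih]
    unfold pvHit
    rw [List.range_succ]
    simp [List.filter_append]
    by_cases hb : pvIsB s (i + 2*k) <;> simp [hb] <;> omega

theorem pvHit_le (s : List Char) (k i : Nat) : pvHit s k i ≤ k := by
  have := List.length_filter_le (fun t => pvIsB s (i + 2 * t)) (List.range k)
  simpa [pvHit] using this

theorem pvCountRange (s : List Char) :
    ((List.range s.length).filter (fun p => pvIsB s p)).length
      = s.countP (fun c => c == 'B') := by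
  induction s using List.reverseRecOn with
  | nil => simp
  | append_singleton t c ih =>
    rw [List.length_append, List.length_singleton, List.range_succ]
    simp only [List.filter_append, List.length_append, List.countP_append]
    have h1 : ∀ p ∈ List.range t.length, pvIsB (t ++ [c]) p = pvIsB t p := by
      intro p hp
      simp [pvIsB, List.getElem?_append_left (List.mem_range.mp hp)]
    rw [List.filter_congr h1, ih]
    have h2 : pvIsB (t ++ [c]) t.length = (c == 'B') := by
      simp [pvIsB]
    rw [List.filter_singleton, h2]
    by_cases hb : c = 'B'
    · simp [hb]
    · have hf : (c == 'B') = false := beq_eq_false_iff_ne.mpr hb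
      simp [hf]

def pvW (s : List Char) (k i : Nat) : Int := (k : Int) - pvHit s k i

theorem pvSp_eq (s : List Char) :
    (PySem.List.pyRange 0 (s.length : Int) 1).filter (fun i => PySem.List.pyGet? s i == some 'B')
      = ((List.range s.length).filter (fun p => pvIsB s p)).map (fun p : Nat => (p : Int)) := by
  rw [PySem.List.pyRange_zero_natCast, List.filter_map]
  have h : ∀ x ∈ List.range s.length,
      ((fun i => PySem.List.pyGet? s i == some 'B') ∘ (fun k : Nat => (k : Int))) x = pvIsB s x := by
    intro p _
    simp [Function.comp, PySem.List.pyGet?_natCast, pvIsB]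
  rw [List.filter_congr h]

theorem pvMem_sp (s : List Char) (q : Nat) :
    ((q : Int) ∈ ((List.range s.length).filter (fun p => pvIsB s p)).map (fun p : Nat => (p : Int)))
      ↔ pvIsB s q = true := by
  constructor
  · intro h
    obtain ⟨p, hp, hc⟩ := List.mem_map.mp h
    obtain ⟨_, hB⟩ := List.mem_filter.mp hp
    have : p = q := by exact_mod_cast hc
    subst this; exact hB
  · intro hB
    exact List.mem_map.mpr ⟨q, List.mem_filter.mpr
      ⟨List.mem_range.mpr (pvIsB_lt hB), hB⟩, rfl⟩

theorem pvMovesA (s : List Char) (kN : Nat) (hk : 1 ≤ kN) (i : Nat) :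
    (PySem.List.pyRange (i : Int) ((i : Int) + ((kN : Int) * 2 - 1) + 1) 2).foldl
      (fun m pos => if (PySem.Set.ofList (((List.range s.length).filter
          (fun p => pvIsB s p)).map (fun p : Nat => (p : Int)))).contains pos then m else m + 1) 0
      = pvW s kN i := by
  have hb : (i : Int) + ((kN : Int) * 2 - 1) + 1 = (i : Int) + 2 * kN := by ring
  rw [hb, PySem.List.pyRange_of_pos _ _ (by norm_num : (0:Int) < 2)]
  have hlt : (i : Int) < (i : Int) + 2 * kN := by
    have : (1:Int) ≤ (kN : Int) := by exact_mod_cast hk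
    omega
  rw [if_pos hlt]
  have hlen : (((i : Int) + 2 * kN - i + 2 - 1) / 2).toNat = kN := by
    have : ((i : Int) + 2 * kN - i + 2 - 1) / 2 = (kN : Int) := by omega
    omega
  rw [hlen, List.foldl_map]
  rw [PySem.List.foldl_congr_mem _ _
    (fun m t => if pvIsB s (i + 2 * t) then m else m + 1) _ ?_]
  · rw [PySem.List.foldl_congr_mem _ _
      (fun m t => if (fun t => !pvIsB s (i + 2 * t)) t then m + 1 else m) _ ?_]
    · rw [PySem.List.foldl_count_if]
      have hsplit := @List.length_eq_length_filter_add _ (List.range kN) (fun t => pvIsB s (i + 2 * t))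
      have hle := pvHit_le s kN i
      simp only [List.countP_eq_length_filter, List.length_range] at *
      unfold pvW pvHit
      have h1 : (List.filter (fun t => !pvIsB s (i + 2 * t)) (List.range kN)).length
          = kN - (List.filter (fun t => pvIsB s (i + 2 * t)) (List.range kN)).length := by omega
      rw [h1]
      unfold pvHit at hle
      push_cast [Nat.cast_sub (by omega : (List.filter (fun t => pvIsB s (i + 2 * t)) (List.range kN)).length ≤ kN)]
      ring
    · intro acc t _
      by_cases hB : pvIsB s (i + 2 * t) <;> simp [hB]
  · intro acc t _
    have hc : (PySem.Set.ofList (((List.range s.length).filter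
        (fun p => pvIsB s p)).map (fun p : Nat => (p : Int)))).contains ((i : Int) + 2 * t)
        = pvIsB s (i + 2 * t) := by
      rw [Bool.eq_iff_iff, PySem.Set.contains_iff, PySem.Set.mem_ofList]
      have : (i : Int) + 2 * (t : Int) = ((i + 2 * t : Nat) : Int) := by push_cast; ring
      rw [this, pvMem_sp]
    rw [hc]

theorem pvPre_spec (s : List Char) (m : Nat) :
    (PySem.List.pyRange 2 ((m : Int) + 2) 1).foldl
      (fun pre j => pre ++ [(PySem.List.pyGet? pre (j - 2)).getD 0 +
        (if PySem.List.pyGet? s (j - 2) == some 'B' then 1 else 0)]) [0, 0]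
      = (List.range (m + 2)).map (fun j => (pvCnt s j : Int)) := by
  induction m with
  | zero =>
    have h0 : (((0 : Nat) : Int) + 2) = (2 : Int) := by norm_num
    rw [h0, show PySem.List.pyRange 2 2 1 = [] from rfl]
    have c0 : pvCnt s 0 = 0 := by simp [pvCnt]
    have c1 : pvCnt s 1 = 0 := by simp [pvCnt, List.range_succ]
    simp [List.range_succ, c0, c1]
  | succ m ih =>
    have h1 : ((m : Int) + 1) + 2 = ((m : Int) + 2) + 1 := by ring
    rw [show (((m + 1 : Nat) : Int) + 2) = ((m : Int) + 2) + 1 by push_cast; ring,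
      PySem.List.pyRange_one_succ_right (by omega), List.foldl_append]
    rw [ih]
    simp only [List.foldl_cons, List.foldl_nil]
    have hg1 : (PySem.List.pyGet? ((List.range (m + 2)).map (fun j => (pvCnt s j : Int))) ((m : Int) + 2 - 2)).getD 0 = (pvCnt s m : Int) := by
      rw [show ((m : Int) + 2 - 2) = (m : Int) by ring, PySem.List.pyGet?_natCast]
      simp
    have hg2 : (if PySem.List.pyGet? s ((m : Int) + 2 - 2) == some 'B' then (1:Int) else 0)
        = (if pvIsB s m then 1 else 0) := by
      rw [show ((m : Int) + 2 - 2) = (m : Int) by ring, PySem.List.pyGet?_natCast]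
      simp [pvIsB]
    rw [hg1, hg2]
    have hnew : ((pvCnt s m : Int) + (if pvIsB s m then 1 else 0)) = (pvCnt s (m + 2) : Int) := by
      rw [pvCnt_step]
      by_cases hB : pvIsB s m <;> simp [hB]
    rw [hnew]
    simp [List.range_succ]

def pvRes (s : List Char) : Int :=
  if s.countP (fun c => c == 'B') = 0 then 0
  else if ((s.countP (fun c => c == 'B') : Int)) * 2 - 1 > (s.length : Int) then -1
  else (List.range (s.length + 1 - 2 * s.countP (fun c => c == 'B'))).foldl
    (fun m i => min m (pvW s (s.countP (fun c => c == 'B')) (i + 1)))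
    (pvW s (s.countP (fun c => c == 'B')) 0)

theorem pvOptFold (W : Nat → Int) (l : List Nat) (v : Int) :
    l.foldl (fun (acc : Option Int) i =>
        some (match acc with | none => W i | some w => min w (W i))) (some v)
      = some (l.foldl (fun m i => min m (W i)) v) := by
  induction l generalizing v with
  | nil => rfl
  | cons x xs ih => simp only [List.foldl_cons]; rw [ih]

theorem solutionA_eq (b : String) : solution b = pvRes b.toList := by
  simp only [solution]
  rw [pvSp_eq]
  have hflen : (List.filter (fun p => pvIsB b.toList p) (List.range b.toList.length)).length
      = b.toList.countP (fun c => c == 'B') := pvCountRange b.toList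
  by_cases h0 : b.toList.countP (fun c => c == 'B') = 0
  · have hnil : (List.filter (fun p => pvIsB b.toList p) (List.range b.toList.length)) = [] := by
      rw [← List.length_eq_zero_iff]; omega
    rw [hnil]
    simp [pvRes, h0]
  · have hne : (List.map (fun p : Nat => (p : Int)) (List.filter (fun p => pvIsB b.toList p)
        (List.range b.toList.length))).isEmpty = false := by
      rw [List.isEmpty_eq_false_iff]
      intro hcontra
      have hl0 := congrArg List.length hcontra
      simp only [List.length_map, List.length_nil] at hl0
      omega
    rw [hne]
    simp only [Bool.false_eq_true, if_false, List.length_map, hflen]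
    by_cases hL : ((b.toList.countP (fun c => c == 'B') : Int)) * 2 - 1 > (b.toList.length : Int)
    · rw [if_pos hL]
      rw [pvRes, if_neg h0, if_pos hL]
    · rw [if_neg hL]
      rw [pvRes, if_neg h0, if_neg hL]
      have hk : 1 ≤ b.toList.countP (fun c => c == 'B') := Nat.one_le_iff_ne_zero.mpr h0
      have hln : 2 * b.toList.countP (fun c => c == 'B') - 1 ≤ b.toList.length := by
        omega
      have hbound : (b.toList.length : Int) - ((b.toList.countP (fun c => c == 'B') : Int) * 2 - 1) + 1
          = (((b.toList.length + 1 - 2 * b.toList.countP (fun c => c == 'B')) + 1 : Nat) : Int) := by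
        omega
      rw [hbound, PySem.List.pyRange_zero_natCast, List.foldl_map]
      rw [PySem.List.foldl_congr_mem _ _
        (fun (acc : Option Int) (i : Nat) => some (match acc with
          | none => pvW b.toList (b.toList.countP (fun c => c == 'B')) i
          | some w => min w (pvW b.toList (b.toList.countP (fun c => c == 'B')) i))) _
        (by intro acc x _
            rw [pvMovesA b.toList (b.toList.countP (fun c => c == 'B')) hk x])]
      rw [List.range_succ_eq_map, List.foldl_cons]
      show (Option.getD (List.foldl _ (some (pvW b.toList (b.toList.countP (fun c => c == 'B')) 0)) _) 0) = _
      rw [pvOptFold]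
      simp only [Option.getD_some, List.foldl_map, Nat.succ_eq_add_one]

theorem pvMovesB (s : List Char) (k i : Nat) (hi : i + 2 * k < s.length + 2) :
    (k : Int) - ((PySem.List.pyGet? ((List.range (s.length + 2)).map (fun j => (pvCnt s j : Int)))
        ((i : Int) + 2 * (k : Int))).getD 0
      - (PySem.List.pyGet? ((List.range (s.length + 2)).map (fun j => (pvCnt s j : Int)))
        (i : Int)).getD 0) = pvW s k i := by
  rw [show (i : Int) + 2 * (k : Int) = ((i + 2 * k : Nat) : Int) by push_cast; ring,
    PySem.List.pyGet?_natCast, PySem.List.pyGet?_natCast]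
  have h1 : ((List.range (s.length + 2)).map (fun j => (pvCnt s j : Int)))[i + 2 * k]?
      = some ((pvCnt s (i + 2 * k) : Int)) := by
    simp [List.getElem?_map, List.getElem?_range hi]
  have h2 : ((List.range (s.length + 2)).map (fun j => (pvCnt s j : Int)))[i]?
      = some ((pvCnt s i : Int)) := by
    simp [List.getElem?_map, List.getElem?_range (by omega : i < s.length + 2)]
  rw [h1, h2, Option.getD_some, Option.getD_some, pvCnt_add s k i]
  unfold pvW
  push_cast
  ring

theorem solutionB_eq (b : String) : solution_alt b = pvRes b.toList := by
  simp only [solution_alt, PySem.Str.len_eq]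
  by_cases h0 : b.toList.countP (fun c => c == 'B') = 0
  · rw [if_pos (by exact_mod_cast h0), pvRes, if_pos h0]
  · rw [if_neg (by exact_mod_cast h0), pvRes, if_neg h0]
    by_cases hL : ((b.toList.countP (fun c => c == 'B') : Int)) * 2 - 1 > (b.toList.length : Int)
    · rw [if_pos (by omega), if_pos hL]
    · rw [if_neg (by omega), if_neg hL]
      have hk : 1 ≤ b.toList.countP (fun c => c == 'B') := Nat.one_le_iff_ne_zero.mpr h0
      have hbound : (b.toList.length : Int) - (2 * (b.toList.countP (fun c => c == 'B') : Int) - 1) + 1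
          = (((b.toList.length + 1 - 2 * b.toList.countP (fun c => c == 'B')) + 1 : Nat) : Int) := by
        omega
      rw [pvPre_spec, hbound, PySem.List.pyRange_zero_natCast, List.foldl_map]
      rw [PySem.List.foldl_congr_mem _ _
        (fun (best : Int) (x : Nat) => min best (pvW b.toList (b.toList.countP (fun c => c == 'B')) x)) _
        (by intro best x hx
            rw [pvMovesB b.toList (b.toList.countP (fun c => c == 'B')) x
              (by
                have hxlt := List.mem_range.mp hx
                omega)])]
      rw [List.range_succ_eq_map, List.foldl_cons]
      have hinit : min ((b.toList.countP (fun c => c == 'B') : Int))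
          (pvW b.toList (b.toList.countP (fun c => c == 'B')) 0)
          = pvW b.toList (b.toList.countP (fun c => c == 'B')) 0 := by
        unfold pvW
        have := pvHit_le b.toList (b.toList.countP (fun c => c == 'B')) 0
        omega
      rw [hinit]
      simp only [List.foldl_map, Nat.succ_eq_add_one]

-- ===== VERDICT (by name: the statement is the Claim_ definition above) =====
theorem solution_spec : Claim_equal_solution := by
  intro b _
  unfold Spec_solution
  rw [solutionA_eq, solutionB_eq]
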